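-- pv_equiv track=rewrite | github.com/JerJer2465/pokejax | scripts/diagnose_obs_mismatch.py | _get_feature_name
-- ===== SOURCE A (Python) =====
-- _FEATURE_NAMES = {
--     0: "hp_frac",
--     1: "hp_bin[0:10]",
--     11: "base_stats[0:6]",
--     17: "boosts[0:91]",
--     108: "status[0:7]",
--     115: "volatile[0:27]",
--     142: "type1[0:18]",
--     160: "type2[0:18]",
--     178: "is_fainted",
--     179: "is_active",
--     180: "slot[0:6]",
--     186: "is_own",
--     187: "moves[0:180]",
--     367: "sleep_bin[0:4]",
--     371: "rest_bin[0:3]",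
--     374: "sub_frac",
--     375: "force_trap",
--     376: "mov_dis[0:4]",
--     380: "conf_bin[0:4]",
--     384: "taunt",
--     385: "encore",
--     386: "yawn",
--     387: "level",
--     388: "perish_bin[0:4]",
--     392: "protect",
--     393: "locked_mov",
-- }
--
-- _FIELD_NAMES = {
--     0: "weather[0:5]",
--     5: "wt_turns[0:8]",
--     13: "pseudo[0:5]",
--     18: "tr_turns[0:4]",
--     22: "hazards_own[0:7]",
--     29: "hazards_opp[0:7]",
--     36: "screens_own[0:6]",
--     42: "screens_opp[0:6]",
--     48: "turn_bin[0:10]",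
--     58: "fainted[0:2]",
--     60: "toxic_own[0:5]",
--     65: "toxic_opp[0:5]",
--     70: "tailwind[0:2]",
--     72: "wish[0:2]",
--     74: "safeguard[0:2]",
--     76: "mist[0:2]",
--     78: "lucky_chant[0:2]",
--     80: "gravity_t[0:4]",
-- }
--
-- def _get_feature_name(offset, is_field=False):
--     """Get human-readable feature name for a given offset."""
--     names = _FIELD_NAMES if is_field else _FEATURE_NAMES
--     best_name = f"offset_{offset}"
--     best_off = -1
--     for off, name in sorted(names.items()):
--         if off <= offset and off > best_off:
--             best_name = name
--             best_off = off
--             if "[" in name: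
--                 idx = offset - off
--                 base = name.split("[")[0]
--                 best_name = f"{base}[{idx}]"
--             elif off == offset:
--                 best_name = name
--     return best_name
-- ===== SOURCE B (Python) =====
-- _FEATURE_TABLE = [
--     (0, "hp_frac", False),
--     (1, "hp_bin", True),
--     (11, "base_stats", True),
--     (17, "boosts", True),
--     (108, "status", True),
--     (115, "volatile", True),
--     (142, "type1", True),
--     (160, "type2", True),
--     (178, "is_fainted", False),
--     (179, "is_active", False),
--     (180, "slot", True),
--     (186, "is_own", False),
--     (187, "moves", True),
--     (367, "sleep_bin", True),
--     (371, "rest_bin", True),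
--     (374, "sub_frac", False),
--     (375, "force_trap", False),
--     (376, "mov_dis", True),
--     (380, "conf_bin", True),
--     (384, "taunt", False),
--     (385, "encore", False),
--     (386, "yawn", False),
--     (387, "level", False),
--     (388, "perish_bin", True),
--     (392, "protect", False),
--     (393, "locked_mov", False),
-- ]
--
-- _FIELD_TABLE = [
--     (0, "weather", True),
--     (5, "wt_turns", True),
--     (13, "pseudo", True),
--     (18, "tr_turns", True),
--     (22, "hazards_own", True),
--     (29, "hazards_opp", True),
--     (36, "screens_own", True),
--     (42, "screens_opp", True),
--     (48, "turn_bin", True),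
--     (58, "fainted", True),
--     (60, "toxic_own", True),
--     (65, "toxic_opp", True),
--     (70, "tailwind", True),
--     (72, "wish", True),
--     (74, "safeguard", True),
--     (76, "mist", True),
--     (78, "lucky_chant", True),
--     (80, "gravity_t", True),
-- ]
--
--
-- def _get_feature_name(offset, is_field=False):
--     """Predecessor lookup by binary search in a pre-decoded sorted table
--     (key, base name, is_array) instead of a linear best-tracking scan that
--     re-parses each name."""
--     table = _FIELD_TABLE if is_field else _FEATURE_TABLE
--     lo, hi = 0, len(table)
--     while lo < hi:
--         mid = (lo + hi) // 2
--         if table[mid][0] <= offset: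
--             lo = mid + 1
--         else:
--             hi = mid
--     if lo == 0:
--         return f"offset_{offset}"
--     off, base, is_array = table[lo - 1]
--     return f"{base}[{offset - off}]" if is_array else base
-- ===== Notes on version B (the rewrite author's own statement) =====
-- stated objective: alternative
-- what changed: Replaces A's per-call sort plus linear best-tracking scan that re-parses each name with string operations by a predecessor lookup: a binary search over a pre-decoded, pre-sorted table of (key, base name, is_array) triples, so no sorting, no dict, and no string splitting happen at call time.
import Mathlib
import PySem

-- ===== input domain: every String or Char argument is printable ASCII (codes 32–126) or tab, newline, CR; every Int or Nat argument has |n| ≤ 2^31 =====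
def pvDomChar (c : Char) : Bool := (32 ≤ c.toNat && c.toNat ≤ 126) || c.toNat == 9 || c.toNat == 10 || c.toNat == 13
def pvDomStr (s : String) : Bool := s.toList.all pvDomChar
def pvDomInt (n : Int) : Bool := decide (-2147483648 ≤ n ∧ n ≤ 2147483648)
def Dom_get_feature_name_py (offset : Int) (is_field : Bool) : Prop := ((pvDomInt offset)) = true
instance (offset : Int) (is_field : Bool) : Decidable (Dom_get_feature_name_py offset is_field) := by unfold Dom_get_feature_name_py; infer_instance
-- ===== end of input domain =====

-- B replaces A's per-call sort + linear best-tracking scan (with string re-parsing) by a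
-- binary search over a pre-decoded sorted (key, base, is_array) table; return values identical.

-- ===== PORT A =====

def featureNames : List (Int × String) := [(0, "hp_frac"), (1, "hp_bin[0:10]"),
  (11, "base_stats[0:6]"), (17, "boosts[0:91]"), (108, "status[0:7]"),
  (115, "volatile[0:27]"), (142, "type1[0:18]"), (160, "type2[0:18]"),
  (178, "is_fainted"), (179, "is_active"), (180, "slot[0:6]"), (186, "is_own"),
  (187, "moves[0:180]"), (367, "sleep_bin[0:4]"), (371, "rest_bin[0:3]"),
  (374, "sub_frac"), (375, "force_trap"), (376, "mov_dis[0:4]"),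
  (380, "conf_bin[0:4]"), (384, "taunt"), (385, "encore"), (386, "yawn"),
  (387, "level"), (388, "perish_bin[0:4]"), (392, "protect"), (393, "locked_mov")]

def fieldNames : List (Int × String) := [(0, "weather[0:5]"), (5, "wt_turns[0:8]"),
  (13, "pseudo[0:5]"), (18, "tr_turns[0:4]"), (22, "hazards_own[0:7]"),
  (29, "hazards_opp[0:7]"), (36, "screens_own[0:6]"), (42, "screens_opp[0:6]"),
  (48, "turn_bin[0:10]"), (58, "fainted[0:2]"), (60, "toxic_own[0:5]"),
  (65, "toxic_opp[0:5]"), (70, "tailwind[0:2]"), (72, "wish[0:2]"),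
  (74, "safeguard[0:2]"), (76, "mist[0:2]"), (78, "lucky_chant[0:2]"),
  (80, "gravity_t[0:4]")]

-- name.split("[")[0]: the separator "[" is non-empty so split? is some, and a split result is
-- never the empty list, so index 0 is in range — getD is exact here.
def baseOf (name : String) : String := ((PySem.Str.split? name "[").getD []).getD 0 ""

-- loop body of A: state = (best_name, best_off)
def stepA (offset : Int) (st : String × Int) (p : Int × String) : String × Int :=
  if p.1 ≤ offset ∧ p.1 > st.2 then
    let st1 := (p.2, p.1)
    if PySem.Str.isIn "[" p.2 then
      (baseOf p.2 ++ "[" ++ PySem.Int.toStr (offset - p.1) ++ "]", p.1)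
    else if p.1 = offset then (p.2, p.1)
    else st1
  else st

def get_feature_name_py (offset : Int) (is_field : Bool) : String :=
  let names := if is_field then fieldNames else featureNames
  -- sorted(names.items()): Python compares the pairs lexicographically; the keys are
  -- pairwise distinct, so sorting by the key alone is exact here.
  let pairs := PySem.List.sorted names (fun p => p.1)
  (pairs.foldl (stepA offset) ("offset_" ++ PySem.Int.toStr offset, -1)).1

-- ===== PORT B =====

-- B's pre-decoded sorted tables: (key, base name, is_array)
def featTable : List (Int × String × Bool) := [(0, "hp_frac", false), (1, "hp_bin", true),
  (11, "base_stats", true), (17, "boosts", true), (108, "status", true),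
  (115, "volatile", true), (142, "type1", true), (160, "type2", true),
  (178, "is_fainted", false), (179, "is_active", false), (180, "slot", true),
  (186, "is_own", false), (187, "moves", true), (367, "sleep_bin", true),
  (371, "rest_bin", true), (374, "sub_frac", false), (375, "force_trap", false),
  (376, "mov_dis", true), (380, "conf_bin", true), (384, "taunt", false),
  (385, "encore", false), (386, "yawn", false), (387, "level", false),
  (388, "perish_bin", true), (392, "protect", false), (393, "locked_mov", false)]

def fldTable : List (Int × String × Bool) := [(0, "weather", true), (5, "wt_turns", true),
  (13, "pseudo", true), (18, "tr_turns", true), (22, "hazards_own", true),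
  (29, "hazards_opp", true), (36, "screens_own", true), (42, "screens_opp", true),
  (48, "turn_bin", true), (58, "fainted", true), (60, "toxic_own", true),
  (65, "toxic_opp", true), (70, "tailwind", true), (72, "wish", true),
  (74, "safeguard", true), (76, "mist", true), (78, "lucky_chant", true),
  (80, "gravity_t", true)]

-- the 'while lo < hi' loop of B; table[mid] is always in range in this loop
-- (0 ≤ lo ≤ mid < hi ≤ len(table)), so pyGetD with a default entry is exact.
def bsearchB (t : List (Int × String × Bool)) (offset : Int) (lo hi : Int) : Int :=
  if h : lo < hi then
    let mid := PySem.Int.floordiv (lo + hi) 2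
    if (PySem.List.pyGetD t mid (0, "", false)).1 ≤ offset then bsearchB t offset (mid + 1) hi
    else bsearchB t offset lo mid
  else lo
termination_by (hi - lo).toNat
decreasing_by
  · have hb := PySem.Int.floordiv_two_mid_bounds h.le
    omega
  · have hb := PySem.Int.floordiv_two_mid_bounds h.le
    have hlt : PySem.Int.floordiv (lo + hi) 2 < hi :=
      (PySem.Int.floordiv_lt_iff_lt_mul (by omega)).mpr (by omega)
    omega

def get_feature_name_py_alt (offset : Int) (is_field : Bool) : String :=
  let table := if is_field then fldTable else featTable
  let lo := bsearchB table offset 0 (table.length : Int)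
  if lo = 0 then "offset_" ++ PySem.Int.toStr offset
  else
    -- lo - 1 is a valid index (1 ≤ lo ≤ len(table)), so pyGetD is exact
    let e := PySem.List.pyGetD table (lo - 1) (0, "", false)
    if e.2.2 then e.2.1 ++ "[" ++ PySem.Int.toStr (offset - e.1) ++ "]" else e.2.1

-- ===== PRECONDITION & SPEC =====
def Spec_get_feature_name_py (offset : Int) (is_field : Bool) (out : String) : Prop := out = get_feature_name_py_alt offset is_field
instance (offset : Int) (is_field : Bool) (out : String) : Decidable (Spec_get_feature_name_py offset is_field out) := by unfold Spec_get_feature_name_py; infer_instance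

-- ===== CLAIM (what is proved, stated in full; the proofs are below) =====
def Claim_equal_get_feature_name_py : Prop := ∀ (offset : Int) (is_field : Bool), Dom_get_feature_name_py offset is_field → Spec_get_feature_name_py offset is_field (get_feature_name_py offset is_field)

-- ===== LEMMAS AND PROOFS =====

-- the decoding relation between A's (key, raw name) pairs and B's table entries
def decodeEntry (p : Int × String) : Int × String × Bool :=
  (p.1, if PySem.Str.isIn "[" p.2 then baseOf p.2 else p.2, PySem.Str.isIn "[" p.2)

-- the value A's loop keeps for the winning pair
def fmtA (offset : Int) (p : Int × String) : String :=
  if PySem.Str.isIn "[" p.2 then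
    baseOf p.2 ++ "[" ++ PySem.Int.toStr (offset - p.1) ++ "]"
  else p.2

lemma stepA_pos (offset : Int) (st : String × Int) (p : Int × String)
    (h1 : p.1 ≤ offset) (h2 : p.1 > st.2) :
    stepA offset st p = (fmtA offset p, p.1) := by
  unfold stepA fmtA
  rw [if_pos ⟨h1, h2⟩]
  split_ifs with hb he <;> rfl

lemma stepA_neg (offset : Int) (st : String × Int) (p : Int × String)
    (h1 : offset < p.1) : stepA offset st p = st := by
  unfold stepA
  rw [if_neg]
  rintro ⟨h, -⟩; omega

lemma foldA_gt (offset : Int) (l : List (Int × String)) (st : String × Int)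
    (h : ∀ p ∈ l, offset < p.1) : l.foldl (stepA offset) st = st := by
  induction l generalizing st with
  | nil => rfl
  | cons q t ih =>
      simp only [List.foldl_cons]
      rw [stepA_neg _ _ _ (h q (by simp))]
      exact ih st (fun p hp => h p (by simp [hp]))

lemma foldA_char (offset : Int) (l : List (Int × String)) (st : String × Int)
    (hs : l.Pairwise (fun p q => p.1 < q.1)) (hst : ∀ p ∈ l, st.2 < p.1) :
    l.foldl (stepA offset) st =
      match (l.filter (fun p => decide (p.1 ≤ offset))).getLast? with
      | none => st
      | some p => (fmtA offset p, p.1) := by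
  induction l generalizing st with
  | nil => rfl
  | cons q t ih =>
      rcases List.pairwise_cons.mp hs with ⟨hqt, ht⟩
      by_cases hq : q.1 ≤ offset
      · simp only [List.foldl_cons]
        rw [stepA_pos _ _ _ hq (hst q (by simp))]
        rw [ih (fmtA offset q, q.1) ht (fun p hp => hqt p hp)]
        simp only [List.filter_cons, hq, decide_true, if_true]
        cases hft : t.filter (fun p => decide (p.1 ≤ offset)) with
        | nil => simp
        | cons a b =>
            cases hg : (a :: b).getLast? with
            | none => simp at hg
            | some p => rw [List.getLast?_cons_cons, hg]
      · rw [not_le] at hq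
        simp only [List.foldl_cons]
        rw [stepA_neg _ _ _ hq]
        rw [foldA_gt offset t st (fun p hp => lt_trans hq (hqt p hp))]
        have hf : (q :: t).filter (fun p => decide (p.1 ≤ offset)) = [] := by
          rw [List.filter_eq_nil_iff]
          intro a ha
          rcases List.mem_cons.mp ha with rfl | ha
          · simp; omega
          · have := hqt a ha; simp; omega
        rw [hf]
        rfl

-- the filtered prefix of a strictly key-sorted list is its take at the count
lemma filter_eq_take (offset : Int) (l : List (Int × String))
    (hs : l.Pairwise (fun p q => p.1 < q.1)) :
    l.filter (fun p => decide (p.1 ≤ offset)) =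
      l.take (l.countP (fun p => decide (p.1 ≤ offset))) := by
  induction l with
  | nil => rfl
  | cons q t ih =>
      rcases List.pairwise_cons.mp hs with ⟨hqt, ht⟩
      by_cases hq : q.1 ≤ offset
      · simp only [List.filter_cons, List.countP_cons, hq, decide_true, if_true]
        rw [ih ht]
        rfl
      · rw [not_le] at hq
        have hall : ∀ a ∈ q :: t, ¬((fun p => decide (p.1 ≤ offset)) a = true) := by
          intro a ha
          rcases List.mem_cons.mp ha with rfl | ha
          · simp; omega
          · have := hqt a ha; simp; omega
        have hf : (q :: t).filter (fun p => decide (p.1 ≤ offset)) = [] :=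
          List.filter_eq_nil_iff.mpr hall
        have hc : (q :: t).countP (fun p => decide (p.1 ≤ offset)) = 0 :=
          List.countP_eq_zero.mpr hall
        rw [hf, hc]
        rfl

lemma countP_of_split {α : Type} (keys : List α) (P : α → Bool) (m : Nat)
    (hm : m ≤ keys.length)
    (h1 : ∀ (j : Nat) (hj : j < keys.length), j < m → P keys[j] = true)
    (h2 : ∀ (j : Nat) (hj : j < keys.length), m ≤ j → P keys[j] = false) :
    keys.countP P = m := by
  have hsplit : keys = keys.take m ++ keys.drop m := (List.take_append_drop m keys).symm
  rw [hsplit, List.countP_append]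
  have htake : (keys.take m).countP P = (keys.take m).length := by
    rw [List.countP_eq_length]
    intro a ha
    rcases List.mem_iff_getElem.mp ha with ⟨j, hj, rfl⟩
    have hjl : j < keys.length := lt_of_lt_of_le hj (by simp)
    rw [List.getElem_take]
    exact h1 j hjl (lt_of_lt_of_le hj (by simp [List.length_take]))
  have hdrop : (keys.drop m).countP P = 0 := by
    rw [List.countP_eq_zero]
    intro a ha
    rcases List.mem_iff_getElem.mp ha with ⟨j, hj, rfl⟩
    rw [List.getElem_drop]
    simp only [List.length_drop] at hj
    rw [h2 (m + j) (by omega) (by omega)]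
    simp
  rw [htake, hdrop, List.length_take]
  omega

-- B's loop lands on the count of keys ≤ offset of a key-sorted table
lemma bsearchB_char (t : List (Int × String × Bool)) (offset : Int) (lo hi : Int)
    (hmono : ∀ (i j : Nat) (hi' : i < t.length) (hj' : j < t.length),
      i ≤ j → (t[i]).1 ≤ (t[j]).1)
    (h0 : 0 ≤ lo) (hlh : lo ≤ hi) (hhl : hi ≤ (t.length : Int))
    (hlo : ∀ (j : Nat) (hj : j < t.length), (j : Int) < lo → (t[j]).1 ≤ offset)
    (hhi : ∀ (j : Nat) (hj : j < t.length), hi ≤ (j : Int) → offset < (t[j]).1) :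
    bsearchB t offset lo hi = (t.countP (fun e => decide (e.1 ≤ offset)) : Int) := by
  by_cases h : lo < hi
  · have hb := PySem.Int.floordiv_two_mid_bounds h.le
    have hltm : PySem.Int.floordiv (lo + hi) 2 < hi :=
      (PySem.Int.floordiv_lt_iff_lt_mul (by omega)).mpr (by omega)
    rw [bsearchB, dif_pos h]
    show (if (PySem.List.pyGetD t (PySem.Int.floordiv (lo + hi) 2) (0, "", false)).1 ≤ offset then
        bsearchB t offset (PySem.Int.floordiv (lo + hi) 2 + 1) hi
      else bsearchB t offset lo (PySem.Int.floordiv (lo + hi) 2)) = _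
    set mid := PySem.Int.floordiv (lo + hi) 2 with hmid
    have hmr : mid.toNat < t.length := by omega
    have hget : PySem.List.pyGetD t mid (0, "", false) = t[mid.toNat] := by
      rw [PySem.List.pyGetD_of_nonneg _ _ (by omega), List.getD_eq_getElem?_getD,
        List.getElem?_eq_getElem hmr]
      rfl
    rw [hget]
    by_cases hc : (t[mid.toNat]).1 ≤ offset
    · rw [if_pos hc]
      exact bsearchB_char t offset (mid + 1) hi hmono (by omega) (by omega) hhl
        (fun j hj hjlt => le_trans (hmono j mid.toNat hj hmr (by omega)) hc) hhi
    · rw [if_neg hc]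
      rw [not_le] at hc
      exact bsearchB_char t offset lo mid hmono h0 (by omega) (by omega) hlo
        (fun j hj hjge => lt_of_lt_of_le hc (hmono mid.toNat j hmr hj (by omega)))
  · have hlohi : lo = hi := le_antisymm hlh (by omega)
    rw [bsearchB, dif_neg h]
    have : t.countP (fun e => decide (e.1 ≤ offset)) = lo.toNat := by
      apply countP_of_split _ _ _ (by omega)
      · intro j hj hjm
        simp only [decide_eq_true_eq]
        exact hlo j hj (by omega)
      · intro j hj hjm
        simp only [decide_eq_false_iff_not, not_le]
        exact hhi j hj (by omega)
    rw [this]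
    omega
termination_by (hi - lo).toNat
decreasing_by
  · omega
  · omega

-- the shared core: on any strictly key-sorted association list, A's scan and B's
-- binary search in the decoded table return the same string
lemma core_equiv (offset : Int) (l : List (Int × String)) (t : List (Int × String × Bool))
    (hdec : t = l.map decodeEntry)
    (hs : l.Pairwise (fun p q => p.1 < q.1))
    (hpos : ∀ p ∈ l, (-1 : Int) < p.1) :
    ((PySem.List.sorted l (fun p => p.1)).foldl (stepA offset)
        ("offset_" ++ PySem.Int.toStr offset, -1)).1 =
      (let lo := bsearchB t offset 0 (t.length : Int)
       if lo = 0 then "offset_" ++ PySem.Int.toStr offset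
       else
         let e := PySem.List.pyGetD t (lo - 1) (0, "", false)
         if e.2.2 then e.2.1 ++ "[" ++ PySem.Int.toStr (offset - e.1) ++ "]" else e.2.1) := by
  subst hdec
  have hsortedA : PySem.List.sorted l (fun p => p.1) = l :=
    PySem.List.sorted_eq_self_of_pairwise l _ (hs.imp le_of_lt)
  rw [hsortedA]
  have hlen : (l.map decodeEntry).length = l.length := by simp
  have hkey : ∀ (j : Nat) (hj : j < l.length), ((l.map decodeEntry)[j]'(by omega)).1 = (l[j]).1 := by
    intro j hj
    simp [decodeEntry]
  have hmono : ∀ (i j : Nat) (hi' : i < (l.map decodeEntry).length)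
      (hj' : j < (l.map decodeEntry).length), i ≤ j →
      ((l.map decodeEntry)[i]).1 ≤ ((l.map decodeEntry)[j]).1 := by
    intro i j hi' hj' hij
    rw [hkey i (by omega), hkey j (by omega)]
    rcases Nat.lt_or_ge i j with hlt | hge
    · exact le_of_lt (List.pairwise_iff_getElem.mp hs i j (by omega) (by omega) hlt)
    · have : i = j := by omega
      subst this; rfl
  set n := (l.map decodeEntry).countP (fun e => decide (e.1 ≤ offset)) with hn
  have hnl : n ≤ l.length := by
    have := List.countP_le_length (p := fun e => decide (e.1 ≤ offset)) (l := l.map decodeEntry)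
    omega
  have hcount : l.countP (fun p => decide (p.1 ≤ offset)) = n := by
    rw [hn, List.countP_map]; rfl
  have hbs : bsearchB (l.map decodeEntry) offset 0 ((l.map decodeEntry).length : Int) = (n : Int) := by
    apply bsearchB_char _ offset 0 _ hmono (by omega) (by omega) (by omega)
    · intro j hj hjlt; omega
    · intro j hj hjge; omega
  rw [foldA_char offset l _ hs hpos]
  simp only [hbs]
  rw [filter_eq_take offset l hs, hcount]
  cases hcase : n with
  | zero =>
      simp
  | succ m =>
      have hml : m < l.length := by omega
      have htl : (l.take (m + 1)).length = m + 1 := by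
        rw [List.length_take]; omega
      have hlast : (l.take (m + 1)).getLast? = some l[m] := by
        rw [List.getLast?_eq_getElem?, htl]
        simp only [Nat.add_sub_cancel, List.getElem?_take, Nat.lt_succ_self, if_true]
        exact List.getElem?_eq_getElem hml
      rw [hlast]
      have hne : ((m + 1 : Nat) : Int) ≠ 0 := by omega
      rw [if_neg hne]
      have hoff : PySem.List.pyGetD (l.map decodeEntry) (((m + 1 : Nat) : Int) - 1) (0, "", false)
          = decodeEntry l[m] := by
        have : (((m + 1 : Nat) : Int) - 1) = (m : Int) := by omega
        rw [this, PySem.List.pyGetD_natCast, List.getD_eq_getElem?_getD]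
        rw [List.getElem?_map, List.getElem?_eq_getElem hml]
        rfl
      rw [hoff]
      simp only [decodeEntry, fmtA]
      split_ifs with h <;> simp [h]

-- ===== VERDICT (by name: the statement is the Claim_ definition above) =====
theorem get_feature_name_py_spec : Claim_equal_get_feature_name_py := by
  intro offset is_field _
  unfold Spec_get_feature_name_py get_feature_name_py get_feature_name_py_alt
  cases is_field
  · simp only [Bool.false_eq_true, if_false]
    exact core_equiv offset featureNames featTable (by decide) (by decide) (by decide)
  · simp only [if_true]
    exact core_equiv offset fieldNames fldTable (by decide) (by decide) (by decide)
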